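-- pv_equiv track=rewrite | github.com/mikeizbicki/cmc-csci040 | project_01/markdown_compiler_key.py | compile_italic_underscore
-- ===== SOURCE A (Python) =====
-- def compile_italic_underscore(line):
--     '''
--     Convert "_italic_" into "<i>italic</i>".
--
--     HINT:
--     This function is almost exactly the same as `compile_italic_star`.
--
--     >>> compile_italic_underscore('_This is italic!_ This is not italic.')
--     '<i>This is italic!</i> This is not italic.'
--     >>> compile_italic_underscore('_This is italic!_')
--     '<i>This is italic!</i>'
--     >>> compile_italic_underscore('This is _italic_!')
--     'This is <i>italic</i>!'
--     >>> compile_italic_underscore('This is not _italic!')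
--     'This is not _italic!'
--     >>> compile_italic_underscore('_')
--     '_'
--     '''
--     start_index = None
--     end_index = None
--     for i in range(len(line)):
--         if line[i]=='_':
--             if start_index is None:
--                 start_index = i
--             elif end_index is None:
--                 end_index = i
--
--     if start_index is not None and end_index is not None:
--         new_line = line[:start_index] + '<i>' + line[start_index+1:end_index] + '</i>' + line[end_index+1:]
--     else:
--         new_line = line
--
--     return new_line
-- ===== SOURCE B (Python) =====
-- def compile_italic_underscore(line):
--     # One forward pass: emit characters as we go; on the first '_' emit '<i>',
--     # on the second emit '</i>'; if an opened italic is never closed, fall back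
--     # to the original line.
--     out = []
--     state = 0   # 0 = no underscore seen, 1 = inside italic, 2 = closed
--     for ch in line:
--         if ch == '_' and state == 0:
--             out.append('<i>')
--             state = 1
--         elif ch == '_' and state == 1:
--             out.append('</i>')
--             state = 2
--         else:
--             out.append(ch)
--     if state == 1:
--         return line
--     return ''.join(out)
-- ===== Notes on version B (the rewrite author's own statement) =====
-- stated objective: alternative
-- what changed: Replaced A's two-phase algorithm (record the first two underscore positions in a full index scan, then splice three slices) with a single emit-as-you-go state machine that builds the output inline while scanning and falls back to the original line only if an opened italic is never closed.
import Mathlib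
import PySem

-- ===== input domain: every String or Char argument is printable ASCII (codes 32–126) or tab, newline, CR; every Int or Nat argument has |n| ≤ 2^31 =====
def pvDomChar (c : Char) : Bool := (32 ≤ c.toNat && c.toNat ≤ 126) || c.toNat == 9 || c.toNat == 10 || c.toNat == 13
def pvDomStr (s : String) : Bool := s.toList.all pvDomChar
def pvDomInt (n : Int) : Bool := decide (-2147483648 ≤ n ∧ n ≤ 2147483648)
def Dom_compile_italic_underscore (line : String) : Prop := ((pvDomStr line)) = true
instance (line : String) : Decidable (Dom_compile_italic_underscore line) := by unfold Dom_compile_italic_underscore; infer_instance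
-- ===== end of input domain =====

-- B replaces A's record-positions-then-splice scan with a one-pass emit-as-you-go state machine (alternative decomposition, same cost).

-- ===== PORT A =====
-- A's loop: for i in range(len(line)), remembering the first two indices with line[i]=='_';
-- ported as the obvious structural recursion over the characters carrying the running index i
-- and the same (start_index, end_index) optional state.
def pvAScan (cs : List Char) (i : Nat) (s e : Option Nat) : Option Nat × Option Nat :=
  match cs with
  | [] => (s, e)
  | c :: rest =>
    if c = '_' then
      match s with
      | none => pvAScan rest (i + 1) (some i) e
      | some _ =>
        match e with
        | none => pvAScan rest (i + 1) s (some i)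
        | some _ => pvAScan rest (i + 1) s e
    else pvAScan rest (i + 1) s e

def compile_italic_underscore (line : String) : String :=
  match pvAScan line.toList 0 none none with
  | (some s, some e) =>
    -- Python slices line[:s], line[s+1:e], line[e+1:] with 0 ≤ s < e < len: exactly take/drop
    String.ofList (line.toList.take s ++ "<i>".toList ++ (line.toList.drop (s + 1)).take (e - (s + 1)) ++ "</i>".toList ++ line.toList.drop (e + 1))
  | _ => line

-- ===== PORT B =====
-- B's single pass: an output accumulator and a state (0 = before, 1 = inside italic, 2 = closed);
-- each character is emitted as it is read, the two underscores become '<i>' / '</i>' inline.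
def pvBScan (cs : List Char) (acc : List Char) (state : Nat) : List Char × Nat :=
  match cs with
  | [] => (acc, state)
  | c :: rest =>
    if c = '_' ∧ state = 0 then pvBScan rest (acc ++ "<i>".toList) 1
    else if c = '_' ∧ state = 1 then pvBScan rest (acc ++ "</i>".toList) 2
    else pvBScan rest (acc ++ [c]) state

def compile_italic_underscore_alt (line : String) : String :=
  match pvBScan line.toList [] 0 with
  | (out, state) => if state = 1 then line else String.ofList out

-- ===== PRECONDITION & SPEC =====
def Spec_compile_italic_underscore (line : String) (out : String) : Prop := out = compile_italic_underscore_alt line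
instance (line : String) (out : String) : Decidable (Spec_compile_italic_underscore line out) := by unfold Spec_compile_italic_underscore; infer_instance

-- ===== CLAIM (what is proved, stated in full; the proofs are below) =====
def Claim_equal_compile_italic_underscore : Prop := ∀ (line : String), Dom_compile_italic_underscore line → Spec_compile_italic_underscore line (compile_italic_underscore line)

-- ===== LEMMAS AND PROOFS =====

-- proof-only helper: split a list at its first '_' (none if absent)
def pvPartU : List Char → Option (List Char × List Char)
  | [] => none
  | c :: rest =>
    if c = '_' then some ([], rest)
    else
      match pvPartU rest with
      | none => none
      | some (b, a) => some (c :: b, a)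

theorem pvPartU_none_iff (cs : List Char) : pvPartU cs = none ↔ '_' ∉ cs := by
  induction cs with
  | nil => simp [pvPartU]
  | cons c rest ih =>
    simp only [pvPartU]
    by_cases h : c = '_'
    · simp [h]
    · have h' : ¬ '_' = c := fun he => h he.symm
      cases hp : pvPartU rest with
      | none => simp [h, h', List.mem_cons, ← ih, hp]
      | some p => simp [h, h', List.mem_cons, ← ih, hp]

theorem pvPartU_some (cs b a : List Char) (h : pvPartU cs = some (b, a)) :
    cs = b ++ '_' :: a ∧ '_' ∉ b := by
  induction cs generalizing b a with
  | nil => simp [pvPartU] at h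
  | cons c rest ih =>
    simp only [pvPartU] at h
    by_cases hc : c = '_'
    · simp [hc] at h
      obtain ⟨hb, ha⟩ := h
      subst hb ha
      simp [hc]
    · cases hp : pvPartU rest with
      | none => simp [hc, hp] at h
      | some p =>
        simp [hc, hp] at h
        obtain ⟨hb, ha⟩ := h
        obtain ⟨h1, h2⟩ := ih p.1 p.2 (by simp [hp])
        subst hb ha
        refine ⟨by simp [h1], ?_⟩
        have hc' : ¬ '_' = c := fun he => hc he.symm
        simp [List.mem_cons, h2, hc']

-- A-side: scan with both indices set ignores the rest
theorem pvAScan_full (cs : List Char) (i a b : Nat) :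
    pvAScan cs i (some a) (some b) = (some a, some b) := by
  induction cs generalizing i with
  | nil => rfl
  | cons c rest ih => by_cases h : c = '_' <;> simp [pvAScan, h, ih]

-- A-side: no underscore leaves the state unchanged
theorem pvAScan_no_underscore (cs : List Char) (i : Nat) (s e : Option Nat)
    (h : '_' ∉ cs) : pvAScan cs i s e = (s, e) := by
  induction cs generalizing i with
  | nil => rfl
  | cons c rest ih =>
    simp [List.mem_cons] at h
    have hc : ¬ c = '_' := fun he => h.1 he.symm
    simp [pvAScan, hc, ih _ h.2]

-- A-side: clean prefix then the first underscore, start not yet set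
theorem pvAScan_first (h r : List Char) (i : Nat) (hm : '_' ∉ h) :
    pvAScan (h ++ '_' :: r) i none none
      = pvAScan r (i + h.length + 1) (some (i + h.length)) none := by
  induction h generalizing i with
  | nil => simp [pvAScan]
  | cons c rest ih =>
    simp [List.mem_cons] at hm
    have hc : ¬ c = '_' := fun he => hm.1 he.symm
    simp only [List.cons_append, pvAScan, if_neg hc]
    rw [ih (i + 1) hm.2]
    simp only [List.length_cons]
    have h1 : i + 1 + rest.length + 1 = i + (rest.length + 1) + 1 := by omega
    have h2 : i + 1 + rest.length = i + (rest.length + 1) := by omega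
    rw [h1, h2]

-- A-side: clean prefix then the first underscore, start set, end not
theorem pvAScan_second (m t : List Char) (i a : Nat) (hm : '_' ∉ m) :
    pvAScan (m ++ '_' :: t) i (some a) none
      = pvAScan t (i + m.length + 1) (some a) (some (i + m.length)) := by
  induction m generalizing i with
  | nil => simp [pvAScan]
  | cons c rest ih =>
    simp [List.mem_cons] at hm
    have hc : ¬ c = '_' := fun he => hm.1 he.symm
    simp only [List.cons_append, pvAScan, if_neg hc]
    rw [ih (i + 1) hm.2]
    simp only [List.length_cons]
    have h1 : i + 1 + rest.length + 1 = i + (rest.length + 1) + 1 := by omega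
    have h2 : i + 1 + rest.length = i + (rest.length + 1) := by omega
    rw [h1, h2]

-- B-side: no underscore just copies the characters, any state
theorem pvBScan_no_underscore (cs acc : List Char) (st : Nat) (h : '_' ∉ cs) :
    pvBScan cs acc st = (acc ++ cs, st) := by
  induction cs generalizing acc with
  | nil => simp [pvBScan]
  | cons c rest ih =>
    simp [List.mem_cons] at h
    have hc : ¬ c = '_' := fun he => h.1 he.symm
    simp [pvBScan, hc, ih _ h.2]

-- B-side: state 2 copies everything
theorem pvBScan_state2 (cs acc : List Char) : pvBScan cs acc 2 = (acc ++ cs, 2) := by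
  induction cs generalizing acc with
  | nil => simp [pvBScan]
  | cons c rest ih => by_cases h : c = '_' <;> simp [pvBScan, h, ih]

-- B-side: clean prefix then the first underscore, state 0
theorem pvBScan_first (h r acc : List Char) (hm : '_' ∉ h) :
    pvBScan (h ++ '_' :: r) acc 0 = pvBScan r (acc ++ h ++ "<i>".toList) 1 := by
  induction h generalizing acc with
  | nil => simp [pvBScan]
  | cons c rest ih =>
    simp [List.mem_cons] at hm
    have hc : ¬ c = '_' := fun he => hm.1 he.symm
    simp only [List.cons_append, pvBScan, hc, false_and, if_false]
    rw [ih _ hm.2]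
    simp

-- B-side: clean prefix then the first underscore, state 1
theorem pvBScan_second (m t acc : List Char) (hm : '_' ∉ m) :
    pvBScan (m ++ '_' :: t) acc 1 = pvBScan t (acc ++ m ++ "</i>".toList) 2 := by
  induction m generalizing acc with
  | nil => simp [pvBScan]
  | cons c rest ih =>
    simp [List.mem_cons] at hm
    have hc : ¬ c = '_' := fun he => hm.1 he.symm
    simp only [List.cons_append, pvBScan, hc, false_and, if_false]
    rw [ih _ hm.2]
    simp

-- ===== VERDICT (by name: the statement is the Claim_ definition above) =====
theorem compile_italic_underscore_spec : Claim_equal_compile_italic_underscore := by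
  intro line _
  unfold Spec_compile_italic_underscore compile_italic_underscore compile_italic_underscore_alt
  cases h1 : pvPartU line.toList with
  | none =>
    have hn := (pvPartU_none_iff line.toList).mp h1
    rw [pvAScan_no_underscore _ 0 none none hn, pvBScan_no_underscore _ _ 0 hn]
    simp
  | some p =>
    obtain ⟨head, rest⟩ := p
    obtain ⟨hcs, hhm⟩ := pvPartU_some _ _ _ h1
    cases h2 : pvPartU rest with
    | none =>
      have hr := (pvPartU_none_iff rest).mp h2
      rw [hcs, pvAScan_first head rest 0 hhm,
        pvAScan_no_underscore rest _ _ _ hr,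
        pvBScan_first head rest [] hhm,
        pvBScan_no_underscore rest _ 1 hr]
      simp
    | some q =>
      obtain ⟨mid, tail⟩ := q
      obtain ⟨hr, hmm⟩ := pvPartU_some _ _ _ h2
      subst hr
      rw [hcs]
      rw [pvAScan_first head _ 0 hhm, pvAScan_second mid tail _ _ hmm, pvAScan_full,
        pvBScan_first head _ [] hhm, pvBScan_second mid tail _ hmm, pvBScan_state2]
      dsimp only
      rw [if_neg (by omega)]
      congr 1
      have ht : (head ++ '_' :: (mid ++ '_' :: tail)).take (0 + head.length) = head := by
        simp
      have hd1 : (head ++ '_' :: (mid ++ '_' :: tail)).drop (0 + head.length + 1) = mid ++ '_' :: tail := by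
        simp [List.drop_append]
      have hd2 : (head ++ '_' :: (mid ++ '_' :: tail)).drop (0 + head.length + 1 + mid.length + 1)
          = tail := by
        rw [show 0 + head.length + 1 + mid.length + 1 = head.length + (mid.length + 2) by omega]
        rw [show head ++ '_' :: (mid ++ '_' :: tail) = (head ++ '_' :: mid ++ ['_']) ++ tail by simp]
        exact List.drop_left' (by simp)
      have hmid : List.take (0 + head.length + 1 + mid.length - (0 + head.length + 1)) (mid ++ '_' :: tail) = mid := by
        rw [show 0 + head.length + 1 + mid.length - (0 + head.length + 1) = mid.length by omega]
        exact List.take_left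
      rw [ht, hd1, hd2, hmid]
      simp
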